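-- pv_equiv track=rewrite | github.com/smigass/WDI | Zestaw 3/15.py | check
-- ===== SOURCE A (Python) =====
-- def is_prime(n):
--     if n == 2:
--         return True
--     if n % 2 == 0 or n < 2:
--         return False
--     for i in range(3, int(n ** 0.5) + 1, 2):
--         if n % i == 0:
--             return False
--     return True
--
-- def check(t):
--     a = 1
--     b = 1
--     found_prime = False
--     for i in range(1, len(t) - 1):
--         if i == b:
--             a, b = b, a + b
--             if is_prime(t[i]):
--                 return False
--         else:
--             if is_prime(t[i]):
--                 found_prime = True
--     return found_prime
-- ===== SOURCE B (Python) =====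
-- def is_prime(n):
--     if n == 2:
--         return True
--     if n % 2 == 0 or n < 2:
--         return False
--     for i in range(3, int(n ** 0.5) + 1, 2):
--         if n % i == 0:
--             return False
--     return True
--
-- def check(t):
--     n = len(t) - 1
--     fib = []
--     a, b = 1, 1
--     while b < n:
--         fib.append(b)
--         a, b = b, a + b
--     if any(is_prime(t[i]) for i in fib):
--         return False
--     fib_set = set(fib)
--     return any(is_prime(t[i]) for i in range(1, n) if i not in fib_set)
-- ===== Notes on version B (the rewrite author's own statement) =====
-- stated objective: alternative
-- what changed: Replaces A's single mixed loop with inline a,b Fibonacci tracking and a found_prime flag by a precomputed list of Fibonacci indices followed by two separate classified any() passes (Fibonacci indices first, then the rest).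
import Mathlib
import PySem

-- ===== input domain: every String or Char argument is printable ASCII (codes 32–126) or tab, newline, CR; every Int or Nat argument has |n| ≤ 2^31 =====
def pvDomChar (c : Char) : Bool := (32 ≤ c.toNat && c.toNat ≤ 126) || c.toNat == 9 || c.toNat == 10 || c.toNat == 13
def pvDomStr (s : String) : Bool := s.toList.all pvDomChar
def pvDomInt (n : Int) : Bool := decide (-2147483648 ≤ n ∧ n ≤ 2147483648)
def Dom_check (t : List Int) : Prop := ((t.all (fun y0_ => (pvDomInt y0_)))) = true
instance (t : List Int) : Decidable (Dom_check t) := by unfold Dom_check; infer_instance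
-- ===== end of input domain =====

-- B replaces A's single loop with inline Fibonacci tracking by a precomputed Fibonacci-index
-- list and two separate classified any() passes (objective: alternative decomposition, same cost).
-- is_prime is shared verbatim by both Pythons, so both ports use the same transliteration.

-- ===== PORT A =====
-- t[i] for an index the loop guarantees in range; the default 0 is unreachable.
def pvGetD (t : List Int) (i : Int) : Int := (PySem.List.pyGet? t i).getD 0

-- the 'for i in range(3, int(n**0.5)+1, 2)' trial-division loop of is_prime
def trialLoop (n : Int) : List Int → Bool
  | [] => true
  | i :: rest => if PySem.Int.mod n i == 0 then false else trialLoop n rest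

-- is_prime, shared verbatim by Source A and Source B.  int(n ** 0.5) is ported as Nat.sqrt: the two
-- agree exactly for 0 ≤ n ≤ 2^31 (the stated domain; the branch is reached only for n ≥ 3).
def isPrime (n : Int) : Bool :=
  if n == 2 then true
  else if PySem.Int.mod n 2 == 0 || n < 2 then false
  else trialLoop n (PySem.List.pyRange 3 ((Nat.sqrt n.toNat : Int) + 1) 2)

-- A's for-loop: state (a, b, found_prime), early return False on a prime at a Fibonacci index
def checkLoopA (t : List Int) : List Int → Int → Int → Bool → Bool
  | [], _, _, found => found
  | i :: rest, a, b, found =>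
    if i == b then
      if isPrime (pvGetD t i) then false
      else checkLoopA t rest b (a + b) found
    else
      if isPrime (pvGetD t i) then checkLoopA t rest a b true
      else checkLoopA t rest a b found

def check (t : List Int) : Bool :=
  checkLoopA t (PySem.List.pyRange 1 ((t.length : Int) - 1) 1) 1 1 false

-- ===== PORT B =====
-- Source B's 'while b < n: fib.append(b); a, b = b, a + b', with fuel (n-b).toNat: since
-- 1 ≤ a, b grows by at least 1 per step, so the fuel never runs out before b < n fails.
def fibsAux : Nat → Int → Int → Int → List Int
  | 0, _, _, _ => []
  | fuel + 1, a, b, n => if b < n then b :: fibsAux fuel b (a + b) n else []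

def check_alt (t : List Int) : Bool :=
  let n : Int := (t.length : Int) - 1
  let fib := fibsAux (n - 1).toNat 1 1 n
  if fib.any (fun i => isPrime (pvGetD t i)) then false
  else (PySem.List.pyRange 1 n 1).any (fun i => !(fib.contains i) && isPrime (pvGetD t i))

-- ===== PRECONDITION & SPEC =====
def Spec_check (t : List Int) (out : Bool) : Prop := out = check_alt t
instance (t : List Int) (out : Bool) : Decidable (Spec_check t out) := by unfold Spec_check; infer_instance

-- ===== CLAIM (what is proved, stated in full; the proofs are below) =====
def Claim_equal_check : Prop := ∀ (t : List Int), Dom_check t → Spec_check t (check t)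

-- ===== LEMMAS AND PROOFS =====

-- fuel irrelevance: any fuel ≥ (n - b).toNat yields the same list (needs 1 ≤ a so b grows)
lemma fibsAux_fuel : ∀ (k₁ k₂ : Nat) (a b n : Int), 1 ≤ a → 1 ≤ b → (n - b).toNat ≤ k₁ →
    (n - b).toNat ≤ k₂ → fibsAux k₁ a b n = fibsAux k₂ a b n := by
  intro k₁
  induction k₁ with
  | zero =>
    intro k₂ a b n _ _ h1 _
    have hbn : ¬ b < n := by omega
    cases k₂ with
    | zero => rfl
    | succ m => simp [fibsAux, hbn]
  | succ m ih =>
    intro k₂ a b n ha hb h1 h2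
    by_cases hbn : b < n
    · cases k₂ with
      | zero => omega
      | succ m₂ =>
        simp only [fibsAux, hbn, if_true]
        exact congrArg _ (ih m₂ b (a + b) n hb (by omega) (by omega) (by omega))
    · cases k₂ with
      | zero => simp [fibsAux, hbn]
      | succ m₂ => simp [fibsAux, hbn]

-- every produced Fibonacci index is at least b
lemma fibsAux_lb : ∀ (k : Nat) (a b n x : Int), 1 ≤ a → 1 ≤ b → x ∈ fibsAux k a b n → b ≤ x := by
  intro k
  induction k with
  | zero => intro a b n x _ _ hx; simp [fibsAux] at hx
  | succ m ih =>
    intro a b n x ha hb hx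
    by_cases hbn : b < n
    · simp only [fibsAux, hbn, if_true, List.mem_cons] at hx
      rcases hx with rfl | hx
      · exact le_refl _
      · have := ih b (a + b) n x hb (by omega) hx; omega
    · simp [fibsAux, hbn] at hx

-- characterisation of A's loop in terms of B's Fibonacci list and two passes
lemma loopA_char (t : List Int) (n : Int) : ∀ (k : Nat) (i a b : Int) (found : Bool),
    (n - i).toNat ≤ k → 1 ≤ a → a ≤ b → i ≤ b →
    checkLoopA t (PySem.List.pyRange i n 1) a b found =
      (if (fibsAux (n - b).toNat a b n).any (fun j => isPrime (pvGetD t j)) then false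
       else found || (PySem.List.pyRange i n 1).any
              (fun j => !((fibsAux (n - b).toNat a b n).contains j) && isPrime (pvGetD t j))) := by
  intro k
  induction k with
  | zero =>
    intro i a b found hk ha hab hib
    have hr : PySem.List.pyRange i n 1 = [] := by
      rw [PySem.List.pyRange_one]
      have h0 : (n - i).toNat = 0 := by omega
      simp [h0]
    have hf : (n - b).toNat = 0 := by omega
    rw [hr, hf]
    simp [checkLoopA, fibsAux]
  | succ m ih =>
    intro i a b found hk ha hab hib
    by_cases hin : i < n
    · rw [PySem.List.pyRange_one_cons hin]
      by_cases hibeq : i = b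
      · -- Fibonacci index: A consumes the head of the Fibonacci list
        subst hibeq
        obtain ⟨m', hm'⟩ : ∃ m', (n - i).toNat = m' + 1 := ⟨(n - i).toNat - 1, by omega⟩
        rw [hm']
        simp only [fibsAux, hin, if_true]
        have hL' : fibsAux m' i (a + i) n = fibsAux (n - (a + i)).toNat i (a + i) n :=
          fibsAux_fuel m' (n - (a + i)).toNat i (a + i) n (by omega) (by omega) (by omega)
            (le_refl _)
        rw [hL']
        have hIH := ih (i + 1) i (a + i) found (by omega) (by omega) (by omega) (by omega)
        have hlb := fun x hx => fibsAux_lb (n - (a + i)).toNat i (a + i) n x (by omega)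
          (by omega) hx
        simp only [checkLoopA, BEq.rfl, if_true]
        rw [hIH]
        have hq : (PySem.List.pyRange (i + 1) n 1).any
              (fun j => !((i :: fibsAux (n - (a + i)).toNat i (a + i) n).contains j)
                        && isPrime (pvGetD t j))
            = (PySem.List.pyRange (i + 1) n 1).any
              (fun j => !((fibsAux (n - (a + i)).toNat i (a + i) n).contains j)
                        && isPrime (pvGetD t j)) := by
          apply PySem.List.any_congr_mem
          intro j hj
          have hj' : i + 1 ≤ j := (PySem.List.mem_pyRange_one.mp hj).1
          have hne : j ≠ i := by omega
          simp [hne]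
        cases hpi : isPrime (pvGetD t i) with
        | true => simp [hpi]
        | false =>
          simp only [List.any_cons, hpi, Bool.false_or,
            List.any_cons (l := PySem.List.pyRange (i+1) n 1)]
          rw [hq]
          simp
      · -- non-Fibonacci index: the Fibonacci list is untouched and i is not in it
        have hilt : i < b := by omega
        have hbne : (i == b) = false := by simp; omega
        have hmem : i ∉ fibsAux (n - b).toNat a b n := by
          intro hc
          have := fibsAux_lb (n - b).toNat a b n i (by omega) (by omega) hc
          omega
        simp only [checkLoopA, hbne, Bool.false_eq_true, if_false]
        by_cases hany : ((fibsAux (n - b).toNat a b n).any fun j => isPrime (pvGetD t j)) = true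
        · cases hpi : isPrime (pvGetD t i) with
          | true => rw [ih (i + 1) a b true (by omega) ha hab (by omega)]; simp [hany]
          | false => rw [ih (i + 1) a b found (by omega) ha hab (by omega)]; simp [hany]
        · cases hpi : isPrime (pvGetD t i) with
          | true =>
            rw [ih (i + 1) a b true (by omega) ha hab (by omega)]
            simp [hany, hmem, hpi]
          | false =>
            rw [ih (i + 1) a b found (by omega) ha hab (by omega)]
            simp [hany, hmem, hpi]
    · have hr : PySem.List.pyRange i n 1 = [] := by
        rw [PySem.List.pyRange_one]
        have h0 : (n - i).toNat = 0 := by omega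
        simp [h0]
      have hf : (n - b).toNat = 0 := by omega
      rw [hr, hf]
      simp [checkLoopA, fibsAux]

-- ===== VERDICT (by name: the statement is the Claim_ definition above) =====
theorem check_spec : Claim_equal_check := by
  intro t _
  show check t = check_alt t
  unfold check check_alt
  have h := loopA_char t ((t.length : Int) - 1) (((t.length : Int) - 1) - 1).toNat 1 1 1 false
    (by omega) (by omega) (by omega) (by omega)
  simp only [h, Bool.false_or]
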